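-- pv_equiv track=rewrite | github.com/AmaryllisLee/Mastermind | Backend.py | lst_combinatie_genereren
-- ===== SOURCE A (Python) =====
-- import string
--
-- def generate_lijst_letters (aLetters):
--     'Generate a list that contains n letters'
--     lijst_letters = list(string.ascii_uppercase)#maakt een lijst uit de string 'ABCDEFGHIJKLMNOPQRSTUVWXYZ'
--     return lijst_letters[:aLetters]# return lijst_letters to bepaalde index aLetters
--
-- def n_length_combo(lst, n):
--     'Creeert een lijst van alle unieke combinatie uit een lijst '
--     if n == 0:
--         return [[]]
--
--     l = []
--     for i in range(0, len(lst)):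
--
--         m = lst[i]
--         remLst = lst[i + 1:]
--
--         for p in n_length_combo(remLst, n - 1):
--             l.append([m] + p)
--
--     return l
--
-- def lst_combinatie_genereren(aPositie, aLetters):
--     'Alle mogelijke combinatie berkenen en in een set toevoegen'
--     lijst_letters = generate_lijst_letters(aLetters)
--
--     if aPositie == 4:
--         alle_combinatie= []
--         for i in lijst_letters:
--             for j in lijst_letters:
--                 for h in lijst_letters:
--                     for g in lijst_letters:
--                         alle_combinatie.append([i,j,h,g])
--         return alle_combinatie
--     else:
--         lstcombination = n_length_combo(generate_lijst_letters(aLetters), aPositie)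
--         return lstcombination
-- ===== SOURCE B (Python) =====
-- import string
--
-- def _combos(letters, n):
--     # include/exclude recursion on the list structure (combinations without repetition)
--     if n == 0:
--         return [[]]
--     if not letters:
--         return []
--     head, rest = letters[0], letters[1:]
--     return [[head] + c for c in _combos(rest, n - 1)] + _combos(rest, n)
--
-- def lst_combinatie_genereren(aPositie, aLetters):
--     letters = list(string.ascii_uppercase[:aLetters])
--     if aPositie == 4:
--         # 4-fold cartesian product built by repeated extension instead of 4 nested loops
--         res = [[]]
--         for _ in range(4):
--             res = [c + [l] for c in res for l in letters]
--         return res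
--     return _combos(letters, aPositie)
-- ===== Notes on version B (the rewrite author's own statement) =====
-- stated objective: alternative
-- what changed: The combinations branch is rewritten as a binary include/exclude recursion on the letter list (two recursive calls, no index loop or slicing), and the aPositie==4 branch builds the 4-fold product by repeatedly extending a result list instead of four nested loops.
import Mathlib
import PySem

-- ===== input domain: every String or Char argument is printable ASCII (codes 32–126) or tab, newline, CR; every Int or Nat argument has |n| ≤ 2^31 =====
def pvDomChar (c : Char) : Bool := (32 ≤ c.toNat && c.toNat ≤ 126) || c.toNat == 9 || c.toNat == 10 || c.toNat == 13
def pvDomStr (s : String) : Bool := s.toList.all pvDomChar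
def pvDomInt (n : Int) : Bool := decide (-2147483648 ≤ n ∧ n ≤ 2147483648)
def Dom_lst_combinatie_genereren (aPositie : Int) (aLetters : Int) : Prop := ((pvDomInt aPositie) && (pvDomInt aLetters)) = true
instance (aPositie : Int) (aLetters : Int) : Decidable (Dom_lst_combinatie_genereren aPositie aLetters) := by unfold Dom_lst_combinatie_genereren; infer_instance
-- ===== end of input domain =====

-- B replaces A's index-loop-plus-slice recursion by an include/exclude recursion and the four
-- nested product loops by repeated one-step extension (alternative decomposition, same cost).

-- ===== PORT A =====
-- list(string.ascii_uppercase)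
def pvUppercase : List String :=
  ["A","B","C","D","E","F","G","H","I","J","K","L","M",
   "N","O","P","Q","R","S","T","U","V","W","X","Y","Z"]

-- lijst_letters[:aLetters]
def generate_lijst_letters (aLetters : Int) : List String :=
  PySem.List.slice pvUppercase none (some aLetters)

-- n_length_combo: for i in range(len(lst)): m = lst[i]; remLst = lst[i+1:]; append [m]+p for each p.
-- lst[i] with 0 ≤ i < len is getD i (exact); lst[i+1:] with i+1 ≥ 0 is drop (i+1) (exact, PySem.List.slice_from).
def n_length_combo (lst : List String) (n : Int) : List (List String) :=
  if n = 0 then [[]]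
  else
    (List.range lst.length).attach.foldl
      (fun l i =>
        l ++ (n_length_combo (lst.drop (i.1 + 1)) (n - 1)).map (fun p => [lst.getD i.1 ""] ++ p))
      []
termination_by lst.length
decreasing_by
  have : i.1 < lst.length := List.mem_range.mp i.2
  simp only [List.length_drop]; omega

def lst_combinatie_genereren (aPositie : Int) (aLetters : Int) : List (List String) :=
  let lijst_letters := generate_lijst_letters aLetters
  if aPositie = 4 then
    lijst_letters.foldl (fun acc i =>
      lijst_letters.foldl (fun acc j =>
        lijst_letters.foldl (fun acc h =>
          lijst_letters.foldl (fun acc g => acc ++ [[i, j, h, g]]) acc) acc) acc) []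
  else
    n_length_combo (generate_lijst_letters aLetters) aPositie

-- ===== PORT B =====
-- _combos: include/exclude recursion on the list structure
def pvCombos (letters : List String) (n : Int) : List (List String) :=
  if n = 0 then [[]]
  else
    match letters with
    | [] => []
    | head :: rest =>
        (pvCombos rest (n - 1)).map (fun c => [head] ++ c) ++ pvCombos rest n
termination_by letters.length

def lst_combinatie_genereren_alt (aPositie : Int) (aLetters : Int) : List (List String) :=
  let letters := generate_lijst_letters aLetters
  if aPositie = 4 then
    (List.range 4).foldl (fun res _ => res.flatMap (fun c => letters.map (fun l => c ++ [l]))) [[]]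
  else
    pvCombos letters aPositie

-- ===== PRECONDITION & SPEC =====
def Spec_lst_combinatie_genereren (aPositie : Int) (aLetters : Int) (out : List (List String)) : Prop := out = lst_combinatie_genereren_alt aPositie aLetters
instance (aPositie : Int) (aLetters : Int) (out : List (List String)) : Decidable (Spec_lst_combinatie_genereren aPositie aLetters out) := by unfold Spec_lst_combinatie_genereren; infer_instance

-- ===== CLAIM (what is proved, stated in full; the proofs are below) =====
def Claim_equal_lst_combinatie_genereren : Prop := ∀ (aPositie : Int) (aLetters : Int), Dom_lst_combinatie_genereren aPositie aLetters → Spec_lst_combinatie_genereren aPositie aLetters (lst_combinatie_genereren aPositie aLetters)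

-- ===== LEMMAS AND PROOFS =====

-- flatMap characterisation of A's loop (for n ≠ 0)
theorem n_length_combo_flat (lst : List String) (n : Int) (hn : n ≠ 0) :
    n_length_combo lst n =
      (List.range lst.length).flatMap
        (fun i => (n_length_combo (lst.drop (i + 1)) (n - 1)).map (fun p => [lst.getD i ""] ++ p)) := by
  rw [n_length_combo, if_neg hn]
  rw [List.foldl_attach (f := fun l i =>
    l ++ (n_length_combo (lst.drop (i + 1)) (n - 1)).map (fun p => [lst.getD i ""] ++ p))]
  rw [PySem.List.foldl_append_eq_flatMap]
  simp

theorem n_length_combo_cons (x : String) (xs : List String) (n : Int) (hn : n ≠ 0) :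
    n_length_combo (x :: xs) n =
      (n_length_combo xs (n - 1)).map (fun p => [x] ++ p) ++ n_length_combo xs n := by
  rw [n_length_combo_flat (x :: xs) n hn, n_length_combo_flat xs n hn]
  rw [List.length_cons, List.range_succ_eq_map, List.flatMap_cons, List.flatMap_map]
  simp

theorem combo_eq (lst : List String) : ∀ n : Int, n_length_combo lst n = pvCombos lst n := by
  induction lst with
  | nil =>
      intro n
      by_cases hn : n = 0
      · subst hn; rw [n_length_combo, pvCombos]; simp
      · rw [n_length_combo_flat [] n hn, pvCombos, if_neg hn]; simp
  | cons x xs ih =>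
      intro n
      by_cases hn : n = 0
      · subst hn; rw [n_length_combo, pvCombos]; simp
      · rw [n_length_combo_cons x xs n hn, pvCombos, if_neg hn]
        rw [ih (n - 1), ih n]

-- the aPositie == 4 branch: nested loops vs repeated extension
theorem quad_eq (L : List String) :
    L.foldl (fun acc i =>
      L.foldl (fun acc j =>
        L.foldl (fun acc h =>
          L.foldl (fun acc g => acc ++ [[i, j, h, g]]) acc) acc) acc) [] =
    (List.range 4).foldl (fun res _ => res.flatMap (fun c => L.map (fun l => c ++ [l]))) [[]] := by
  have h4 : List.range 4 = [0, 1, 2, 3] := by decide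
  rw [h4]
  simp only [List.foldl_cons, List.foldl_nil]
  simp only [PySem.List.foldl_append_singleton_eq_map, PySem.List.foldl_append_eq_flatMap]
  simp [List.flatMap_assoc, List.flatMap_map]

-- ===== VERDICT (by name: the statement is the Claim_ definition above) =====
theorem lst_combinatie_genereren_spec : Claim_equal_lst_combinatie_genereren := by
  intro aPositie aLetters _
  unfold Spec_lst_combinatie_genereren lst_combinatie_genereren lst_combinatie_genereren_alt
  by_cases h : aPositie = 4
  · simp only [h]
    exact quad_eq (generate_lijst_letters aLetters)
  · simp only [if_neg h]
    exact combo_eq (generate_lijst_letters aLetters) aPositie
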